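-- pv_equiv track=rewrite | github.com/Lordsisodia/Luminelle-Partnership | .blackbox/4-scripts/research/suggest_oss_adoption_plans.py | pick_primary_use_case
-- ===== SOURCE A (Python) =====
-- def pick_primary_use_case(use_cases: list[str]) -> str:
--     priority = [
--         "commerce core",
--         "admin scaffolding",
--         "workflow automation",
--         "search",
--         "analytics",
--         "feature flags",
--         "cms/content",
--     ]
--     for p in priority:
--         if p in use_cases:
--             return p
--     return use_cases[0] if use_cases else "general"
-- ===== SOURCE B (Python) =====
-- def pick_primary_use_case(use_cases: list[str]) -> str:
--     priority = [
--         "commerce core",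
--         "admin scaffolding",
--         "workflow automation",
--         "search",
--         "analytics",
--         "feature flags",
--         "cms/content",
--     ]
--     rank = {name: i for i, name in enumerate(priority)}
--     best = None
--     best_rank = 0
--     for uc in use_cases:
--         r = rank.get(uc)
--         if r is not None and (best is None or r < best_rank):
--             best, best_rank = uc, r
--     if best is not None:
--         return best
--     return use_cases[0] if use_cases else "general"
-- ===== Notes on version B (the rewrite author's own statement) =====
-- stated objective: alternative
-- what changed: Inverted the traversal: instead of scanning the priority list and testing membership in use_cases for each entry (nested scan), B builds a rank index once and makes a single pass over use_cases keeping the element of minimum rank.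
import Mathlib
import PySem

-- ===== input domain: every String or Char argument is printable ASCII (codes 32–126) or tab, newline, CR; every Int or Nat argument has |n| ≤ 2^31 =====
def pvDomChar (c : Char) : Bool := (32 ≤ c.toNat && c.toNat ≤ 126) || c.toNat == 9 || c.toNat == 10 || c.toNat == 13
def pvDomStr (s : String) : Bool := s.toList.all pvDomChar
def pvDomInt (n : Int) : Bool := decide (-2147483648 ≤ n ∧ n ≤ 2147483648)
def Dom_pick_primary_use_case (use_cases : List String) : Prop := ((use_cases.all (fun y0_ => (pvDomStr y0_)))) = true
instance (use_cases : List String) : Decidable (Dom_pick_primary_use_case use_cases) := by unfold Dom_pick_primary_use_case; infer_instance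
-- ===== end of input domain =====

-- B inverts the traversal: one pass over use_cases with a precomputed rank index, instead of
-- scanning the priority list and testing membership in use_cases for each entry (objective: alternative).

-- ===== PORT A =====
-- the fixed priority list of A (and of B)
def pvPrio : List String :=
  ["commerce core", "admin scaffolding", "workflow automation", "search",
   "analytics", "feature flags", "cms/content"]

-- 'for p in priority: if p in use_cases: return p' as structural recursion over priority
def pvPickLoopA (use_cases : List String) : List String → Option String
  | [] => none
  | p :: rest => if use_cases.contains p then some p else pvPickLoopA use_cases rest

def pick_primary_use_case (use_cases : List String) : String :=
  match pvPickLoopA use_cases pvPrio with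
  | some p => p
  | none => match use_cases with
            | [] => "general"
            | x :: _ => x

-- ===== PORT B =====
-- rank = {name: i for i, name in enumerate(priority)}
def pvRank : PySem.Dict String Int :=
  (PySem.List.enumerate pvPrio).foldl (fun d iv => d.insert iv.2 iv.1) PySem.Dict.empty

-- one iteration of B's loop; state = (best, best_rank) fused into an Option
def pvStepB (s : Option (String × Int)) (uc : String) : Option (String × Int) :=
  match pvRank.get? uc with
  | none => s
  | some r =>
    match s with
    | none => some (uc, r)
    | some (_, br) => if r < br then some (uc, r) else s

def pick_primary_use_case_alt (use_cases : List String) : String :=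
  match use_cases.foldl pvStepB none with
  | some (b, _) => b
  | none => match use_cases with
            | [] => "general"
            | x :: _ => x

-- ===== PRECONDITION & SPEC =====
def Spec_pick_primary_use_case (use_cases : List String) (out : String) : Prop := out = pick_primary_use_case_alt use_cases
instance (use_cases : List String) (out : String) : Decidable (Spec_pick_primary_use_case use_cases out) := by unfold Spec_pick_primary_use_case; infer_instance

-- ===== CLAIM (what is proved, stated in full; the proofs are below) =====
def Claim_equal_pick_primary_use_case : Prop := ∀ (use_cases : List String), Dom_pick_primary_use_case use_cases → Spec_pick_primary_use_case use_cases (pick_primary_use_case use_cases)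

-- ===== LEMMAS AND PROOFS =====

-- left-biased "min by rank" combination of two loop states
def pvMin (s t : Option (String × Int)) : Option (String × Int) :=
  match s, t with
  | none, t => t
  | s, none => s
  | some (b, br), some (c, cr) => if cr < br then some (c, cr) else some (b, br)

lemma pvStepB_eq_min (s : Option (String × Int)) (a : String) :
    pvStepB s a = pvMin s (pvStepB none a) := by
  unfold pvStepB pvMin
  cases h : pvRank.get? a with
  | none => cases s with
    | none => rfl
    | some p => rfl
  | some r => cases s with
    | none => rfl
    | some p => rfl

lemma pvMin_none_right (s : Option (String × Int)) : pvMin s none = s := by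
  cases s <;> rfl

lemma pvMin_assoc (s t u : Option (String × Int)) :
    pvMin (pvMin s t) u = pvMin s (pvMin t u) := by
  rcases s with _ | ⟨b, br⟩
  · rfl
  rcases t with _ | ⟨c, cr⟩
  · rfl
  rcases u with _ | ⟨d, dr⟩
  · rw [pvMin_none_right, pvMin_none_right]
  · by_cases h1 : cr < br <;> by_cases h2 : dr < cr <;> by_cases h3 : dr < br <;>
      simp only [pvMin, h1, h2, h3, if_true, if_false] <;>
      first | rfl | (exfalso; omega)

lemma foldl_stepB_eq_min (l : List String) (s : Option (String × Int)) :
    l.foldl pvStepB s = pvMin s (l.foldl pvStepB none) := by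
  induction l generalizing s with
  | nil => cases s with
    | none => rfl
    | some p => rfl
  | cons a l ih =>
    simp only [List.foldl_cons]
    rw [ih (pvStepB s a), ih (pvStepB none a), pvStepB_eq_min s a, pvMin_assoc]

-- the key facts about the concrete rank index
lemma pvRank_inv (y : String) (r : Int) (h : pvRank.get? y = some r) :
    (y, r) ∈ [("commerce core", (0:Int)), ("admin scaffolding", 1), ("workflow automation", 2),
              ("search", 3), ("analytics", 4), ("feature flags", 5), ("cms/content", 6)] := by
  by_cases h0 : y = "commerce core"
  · subst h0
    rw [(by decide : pvRank.get? "commerce core" = some 0)] at h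
    injection h with h; subst h; decide
  by_cases h1 : y = "admin scaffolding"
  · subst h1
    rw [(by decide : pvRank.get? "admin scaffolding" = some 1)] at h
    injection h with h; subst h; decide
  by_cases h2 : y = "workflow automation"
  · subst h2
    rw [(by decide : pvRank.get? "workflow automation" = some 2)] at h
    injection h with h; subst h; decide
  by_cases h3 : y = "search"
  · subst h3
    rw [(by decide : pvRank.get? "search" = some 3)] at h
    injection h with h; subst h; decide
  by_cases h4 : y = "analytics"
  · subst h4
    rw [(by decide : pvRank.get? "analytics" = some 4)] at h
    injection h with h; subst h; decide
  by_cases h5 : y = "feature flags"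
  · subst h5
    rw [(by decide : pvRank.get? "feature flags" = some 5)] at h
    injection h with h; subst h; decide
  by_cases h6 : y = "cms/content"
  · subst h6
    rw [(by decide : pvRank.get? "cms/content" = some 6)] at h
    injection h with h; subst h; decide
  · exfalso
    have : pvRank.get? y = none := by
      simp only [pvRank, pvPrio, PySem.List.enumerate_cons, PySem.List.enumerate_nil,
        List.foldl_cons, List.foldl_nil]
      rw [PySem.Dict.get?_insert_of_ne _ _ h6, PySem.Dict.get?_insert_of_ne _ _ h5,
          PySem.Dict.get?_insert_of_ne _ _ h4, PySem.Dict.get?_insert_of_ne _ _ h3,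
          PySem.Dict.get?_insert_of_ne _ _ h2, PySem.Dict.get?_insert_of_ne _ _ h1,
          PySem.Dict.get?_insert_of_ne _ _ h0]
      rfl
    rw [this] at h; cases h

-- B's fold returns none exactly when no element of the list is ranked
lemma fold_none_iff (l : List String) :
    l.foldl pvStepB none = none ↔ ∀ a ∈ l, pvRank.get? a = none := by
  induction l with
  | nil => simp
  | cons a l ih =>
    rw [List.foldl_cons, foldl_stepB_eq_min]
    constructor
    · intro h
      cases ha : pvRank.get? a with
      | some r =>
        exfalso
        simp only [pvStepB, ha] at h
        cases ht : l.foldl pvStepB none with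
        | none => simp [pvMin, ht] at h
        | some p => simp [pvMin, ht] at h; split at h <;> cases h
      | none =>
        have hs : pvStepB none a = none := by simp [pvStepB, ha]
        rw [hs] at h
        have ht : l.foldl pvStepB none = none := by
          cases ht : l.foldl pvStepB none with
          | none => rfl
          | some p => rw [ht] at h; exact absurd h (by simp [pvMin])
        intro x hx
        rcases List.mem_cons.mp hx with hx | hx
        · exact hx ▸ ha
        · exact ih.mp ht x hx
    · intro h
      have ha : pvRank.get? a = none := h a List.mem_cons_self
      have hs : pvStepB none a = none := by simp [pvStepB, ha]
      have ht : l.foldl pvStepB none = none := ih.mpr (fun x hx => h x (List.mem_cons_of_mem a hx))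
      rw [hs, ht]; rfl

-- B's fold returns a member of the list, carrying its rank, of minimal rank
lemma fold_some_spec (l : List String) (y : String) (r : Int)
    (h : l.foldl pvStepB none = some (y, r)) :
    y ∈ l ∧ pvRank.get? y = some r ∧
      ∀ z ∈ l, ∀ s, pvRank.get? z = some s → r ≤ s := by
  induction l generalizing y r with
  | nil => exact absurd h (by simp)
  | cons a l ih =>
    rw [List.foldl_cons, foldl_stepB_eq_min] at h
    cases ha : pvRank.get? a with
    | none =>
      have hs : pvStepB none a = none := by simp [pvStepB, ha]
      rw [hs] at h
      cases ht : l.foldl pvStepB none with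
      | none => rw [ht] at h; exact absurd h (by simp [pvMin])
      | some p =>
        rw [ht] at h
        simp only [pvMin] at h
        obtain ⟨hy, hr, hmin⟩ := ih y r (ht.trans h)
        refine ⟨List.mem_cons_of_mem a hy, hr, ?_⟩
        intro z hz s hzs
        rcases List.mem_cons.mp hz with hz | hz
        · rw [hz, ha] at hzs; cases hzs
        · exact hmin z hz s hzs
    | some ra =>
      have hs : pvStepB none a = some (a, ra) := by simp [pvStepB, ha]
      rw [hs] at h
      cases ht : l.foldl pvStepB none with
      | none =>
        rw [ht] at h
        simp only [pvMin] at h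
        have h1 : y = a := by cases h; rfl
        have h2 : r = ra := by cases h; rfl
        subst h1; subst h2
        refine ⟨List.mem_cons_self, ha, ?_⟩
        intro z hz s hzs
        rcases List.mem_cons.mp hz with hz | hz
        · rw [hz, ha] at hzs
          injection hzs with hzs
          omega
        · exact absurd hzs (by rw [(fold_none_iff l).mp ht z hz]; simp)
      | some p =>
        rw [ht] at h
        obtain ⟨hy', hr', hmin'⟩ := ih p.1 p.2 (by rw [ht])
        simp only [pvMin] at h
        split at h
        · -- tail's best is strictly smaller: result is the tail's best
          rename_i hlt
          have h1 : y = p.1 := by cases h; rfl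
          have h2 : r = p.2 := by cases h; rfl
          subst h1; subst h2
          refine ⟨List.mem_cons_of_mem a hy', hr', ?_⟩
          intro z hz s hzs
          rcases List.mem_cons.mp hz with hz | hz
          · rw [hz, ha] at hzs
            injection hzs with hzs
            omega
          · exact hmin' z hz s hzs
        · -- head wins (ties keep the head, processed first)
          rename_i hge
          have h1 : y = a := by cases h; rfl
          have h2 : r = ra := by cases h; rfl
          subst h1; subst h2
          refine ⟨List.mem_cons_self, ha, ?_⟩
          intro z hz s hzs
          rcases List.mem_cons.mp hz with hz | hz
          · rw [hz, ha] at hzs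
            injection hzs with hzs
            omega
          · have := hmin' z hz s hzs
            omega

lemma pvRank_prio :
    pvRank.get? "commerce core" = some 0 ∧ pvRank.get? "admin scaffolding" = some 1 ∧
    pvRank.get? "workflow automation" = some 2 ∧ pvRank.get? "search" = some 3 ∧
    pvRank.get? "analytics" = some 4 ∧ pvRank.get? "feature flags" = some 5 ∧
    pvRank.get? "cms/content" = some 6 := by decide

-- ===== VERDICT (by name: the statement is the Claim_ definition above) =====
theorem pick_primary_use_case_spec : Claim_equal_pick_primary_use_case := by
  intro uc _
  show pick_primary_use_case uc = pick_primary_use_case_alt uc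
  unfold pick_primary_use_case pick_primary_use_case_alt
  obtain ⟨hk0, hk1, hk2, hk3, hk4, hk5, hk6⟩ := pvRank_prio
  cases hM : uc.foldl pvStepB none with
  | none =>
    -- no element of uc is ranked ⇒ no priority entry is in uc ⇒ A falls through its loop
    have hnone := (fold_none_iff uc).mp hM
    have habs : ∀ p ∈ pvPrio, p ∉ uc := by
      intro p hp hmem
      have : pvRank.get? p ≠ none := by
        simp only [pvPrio, List.mem_cons, List.not_mem_nil, or_false] at hp
        rcases hp with h|h|h|h|h|h|h <;> subst h <;> simp [hk0, hk1, hk2, hk3, hk4, hk5, hk6]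
      exact this (hnone p hmem)
    have hloop : pvPickLoopA uc pvPrio = none := by
      have c0 : "commerce core" ∉ uc := habs _ (by simp [pvPrio])
      have c1 : "admin scaffolding" ∉ uc := habs _ (by simp [pvPrio])
      have c2 : "workflow automation" ∉ uc := habs _ (by simp [pvPrio])
      have c3 : "search" ∉ uc := habs _ (by simp [pvPrio])
      have c4 : "analytics" ∉ uc := habs _ (by simp [pvPrio])
      have c5 : "feature flags" ∉ uc := habs _ (by simp [pvPrio])
      have c6 : "cms/content" ∉ uc := habs _ (by simp [pvPrio])
      simp [pvPickLoopA, pvPrio, c0, c1, c2, c3, c4, c5, c6]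
    rw [hloop]
  | some p =>
    obtain ⟨py, pr⟩ := p
    obtain ⟨hy, hr, hmin⟩ := fold_some_spec uc py pr hM
    have hcases := pvRank_inv py pr hr
    -- helper: priority entries below the found rank are absent from uc
    have habs : ∀ q : String, ∀ j : Int, pvRank.get? q = some j → j < pr → q ∉ uc := by
      intro q j hq hlt hmem
      exact absurd (hmin q hmem j hq) (by omega)
    simp only [List.mem_cons, List.not_mem_nil, or_false, Prod.mk.injEq] at hcases
    rcases hcases with ⟨hy1, hr1⟩|⟨hy1, hr1⟩|⟨hy1, hr1⟩|⟨hy1, hr1⟩|⟨hy1, hr1⟩|⟨hy1, hr1⟩|⟨hy1, hr1⟩ <;>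
      rw [hy1] at hy ⊢ <;> rw [hr1] at habs
    · simp [pvPickLoopA, pvPrio, hy]
    · have n0 := habs _ _ hk0 (by omega)
      simp [pvPickLoopA, pvPrio, hy, n0]
    · have n0 := habs _ _ hk0 (by omega); have n1 := habs _ _ hk1 (by omega)
      simp [pvPickLoopA, pvPrio, hy, n0, n1]
    · have n0 := habs _ _ hk0 (by omega); have n1 := habs _ _ hk1 (by omega)
      have n2 := habs _ _ hk2 (by omega)
      simp [pvPickLoopA, pvPrio, hy, n0, n1, n2]
    · have n0 := habs _ _ hk0 (by omega); have n1 := habs _ _ hk1 (by omega)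
      have n2 := habs _ _ hk2 (by omega); have n3 := habs _ _ hk3 (by omega)
      simp [pvPickLoopA, pvPrio, hy, n0, n1, n2, n3]
    · have n0 := habs _ _ hk0 (by omega); have n1 := habs _ _ hk1 (by omega)
      have n2 := habs _ _ hk2 (by omega); have n3 := habs _ _ hk3 (by omega)
      have n4 := habs _ _ hk4 (by omega)
      simp [pvPickLoopA, pvPrio, hy, n0, n1, n2, n3, n4]
    · have n0 := habs _ _ hk0 (by omega); have n1 := habs _ _ hk1 (by omega)
      have n2 := habs _ _ hk2 (by omega); have n3 := habs _ _ hk3 (by omega)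
      have n4 := habs _ _ hk4 (by omega); have n5 := habs _ _ hk5 (by omega)
      simp [pvPickLoopA, pvPrio, hy, n0, n1, n2, n3, n4, n5]
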